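-- pv_equiv track=rewrite | github.com/i960107/algorithm-study | soohyun/week8/파괴되지않은건물.py | solution_only_destroyed_buildings
-- ===== SOURCE A (Python) =====
-- import copy
-- from typing import List
--
-- def solution_only_destroyed_buildings(board: List[List[int]], skill: List[List[int]]) -> int:
--     N, M = len(board), len(board[0])
--     ATTACK, DEFNSE = 1, 2
--
--     attacks = []
--     defenses = []
--     for type, *args in skill:
--         if type == ATTACK:
--             attacks.append(args)
--         else:
--             defenses.append(args)
--
--     destroyed = set()
--     for r1, c1, r2, c2, degree in attacks:
--         for r in range(r1, r2 + 1):
--             for c in range(c1, c2 + 1):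
--                 board[r][c] -= degree
--                 if board[r][c] <= 0:
--                     destroyed.add((r, c))
--
--     final_destroyed = copy.deepcopy(destroyed)
--     for r, c in destroyed:
--         for r1, c1, r2, c2, degree in defenses:
--             if r1 <= r <= r2 and c1 <= c <= c2:
--                 board[r][c] += degree
--                 if board[r][c] > 0:
--                     final_destroyed.remove((r, c))
--                     break
--     return N * M - len(final_destroyed)
-- ===== SOURCE B (Python) =====
-- from typing import List
--
--
-- def solution_only_destroyed_buildings(board: List[List[int]], skill: List[List[int]]) -> int:
--     # Cell-major one-pass re-implementation: for each cell simulate its own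
--     # attack history and (if it ever dropped to <= 0) its defense history with
--     # the same early stop; no board mutation, no destroyed set, direct count.
--     N, M = len(board), len(board[0])
--     attacks = [s[1:] for s in skill if s[0] == 1]
--     defenses = [s[1:] for s in skill if s[0] != 1]
--     count = 0
--     for r in range(N):
--         for c in range(M):
--             v = board[r][c]
--             dead = False
--             for r1, c1, r2, c2, d in attacks:
--                 if r1 <= r <= r2 and c1 <= c <= c2:
--                     v -= d
--                     if v <= 0:
--                         dead = True
--             if dead:
--                 for r1, c1, r2, c2, d in defenses:
--                     if r1 <= r <= r2 and c1 <= c <= c2: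
--                         v += d
--                         if v > 0:
--                             dead = False
--                             break
--             if not dead:
--                 count += 1
--     return count
-- ===== Notes on version B (the rewrite author's own statement) =====
-- stated objective: alternative
-- what changed: A sweeps skill-major, mutating the board and maintaining a destroyed set plus a deepcopy that defenses shrink; B sweeps cell-major in one pure pass, simulating each cell's own attack/defense history (with the same early stop) and counting survivors directly, with no mutation, no set and no deepcopy.
-- outside the precondition, e.g. on solution_only_destroyed_buildings([[1]], [[1, -1, 0, -1, 0, 5]]): A returns 0, B returns 1; on solution_only_destroyed_buildings([[1, 2], [3]], []): A returns 4, B raises IndexError; on solution_only_destroyed_buildings([[5]], [[1, 0, 0, 0, 0, 1], [2, 0, 0]]): A returns 1, B returns 1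
import Mathlib
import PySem

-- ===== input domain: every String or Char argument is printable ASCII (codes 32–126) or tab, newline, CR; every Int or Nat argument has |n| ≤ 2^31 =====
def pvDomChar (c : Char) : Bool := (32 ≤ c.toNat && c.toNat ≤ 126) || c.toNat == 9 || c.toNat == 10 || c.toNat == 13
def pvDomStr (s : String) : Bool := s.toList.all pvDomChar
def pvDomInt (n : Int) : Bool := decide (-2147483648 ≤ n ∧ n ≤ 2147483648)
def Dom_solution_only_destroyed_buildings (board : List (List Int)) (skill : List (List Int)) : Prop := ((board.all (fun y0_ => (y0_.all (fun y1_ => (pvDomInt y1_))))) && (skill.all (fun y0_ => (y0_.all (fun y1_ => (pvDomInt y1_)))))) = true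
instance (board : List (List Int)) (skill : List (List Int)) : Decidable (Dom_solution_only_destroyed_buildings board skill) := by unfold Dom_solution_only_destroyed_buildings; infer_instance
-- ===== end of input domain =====

-- B replaces A's skill-major, board-mutating sweep (destroyed set + deepcopy) by a pure
-- cell-major pass that simulates each cell's own attack/defense history and counts survivors
-- directly (same cost class, no mutation); A mutates its `board` argument in place, B does not —
-- the equivalence proved here is about the return value only.


-- ===== PORT A =====
-- board[r][c] (read); exact under Pre_ (indices reached are in range)
def pvACell (b : List (List Int)) (r c : Int) : Int :=
  PySem.List.pyGetD (PySem.List.pyGetD b r []) c 0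

-- board[r][c] = v (write); exact under Pre_ (indices reached are in range)
def pvASet (b : List (List Int)) (r c v : Int) : List (List Int) :=
  PySem.List.pySetD b r (PySem.List.pySetD (PySem.List.pyGetD b r []) c v)

-- `board[r][c] -= degree; if board[r][c] <= 0: destroyed.add((r, c))`
def pvAAtkCell (deg r : Int) (st : List (List Int) × PySem.Set (Int × Int)) (c : Int) :
    List (List Int) × PySem.Set (Int × Int) :=
  let v := pvACell st.1 r c - deg
  (pvASet st.1 r c v, if v ≤ 0 then PySem.Set.add st.2 (r, c) else st.2)

-- `for c in range(c1, c2 + 1)`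
def pvAAtkRow (c1 c2 deg : Int) (st : List (List Int) × PySem.Set (Int × Int)) (r : Int) :
    List (List Int) × PySem.Set (Int × Int) :=
  (PySem.List.pyRange c1 (c2 + 1) 1).foldl (pvAAtkCell deg r) st

-- one attack skill: `for r in range(r1, r2 + 1)`
def pvAAttack (st : List (List Int) × PySem.Set (Int × Int)) (args : List Int) :
    List (List Int) × PySem.Set (Int × Int) :=
  match args with
  | [r1, c1, r2, c2, deg] =>
      (PySem.List.pyRange r1 (r2 + 1) 1).foldl (pvAAtkRow c1 c2 deg) st
  | _ => st  -- Python raises ValueError on a malformed row; Pre_ gives rows of length 5 here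

-- the inner `for r1, c1, r2, c2, degree in defenses: … break` loop for one destroyed cell;
-- `final_destroyed.remove((r, c))` is ported as discard: (r, c) is always still present here
def pvADefend (deflist : List (List Int)) (b : List (List Int))
    (fin : PySem.Set (Int × Int)) (r c : Int) : List (List Int) × PySem.Set (Int × Int) :=
  match deflist with
  | [] => (b, fin)
  | args :: rest =>
    match args with
    | [r1, c1, r2, c2, deg] =>
        if r1 ≤ r ∧ r ≤ r2 ∧ c1 ≤ c ∧ c ≤ c2 then
          let v := pvACell b r c + deg
          let b' := pvASet b r c v
          if 0 < v then (b', PySem.Set.discard fin (r, c))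
          else pvADefend rest b' fin r c
        else pvADefend rest b fin r c
    | _ => (b, fin)  -- malformed row: Python raises ValueError; Pre_ gives length 5

-- iteration over the `destroyed` set: ported in insertion order; the returned count is proved
-- independent of that order (it equals B's order-free count)
def solution_only_destroyed_buildings (board : List (List Int)) (skill : List (List Int)) : Int :=
  let N : Int := board.length
  let M : Int := (PySem.List.pyGetD board 0 []).length
  let ad := skill.foldl (fun (p : List (List Int) × List (List Int)) s =>
      if PySem.List.pyGetD s 0 0 = 1 then (p.1 ++ [PySem.List.slice s (some 1) none], p.2)
      else (p.1, p.2 ++ [PySem.List.slice s (some 1) none])) ([], [])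
  let st := ad.1.foldl pvAAttack (board, PySem.Set.empty)
  let st2 := st.2.foldl (fun (q : List (List Int) × PySem.Set (Int × Int)) p =>
      pvADefend ad.2 q.1 q.2 p.1 p.2) (st.1, st.2)
  N * M - PySem.Set.len st2.2

-- ===== PORT B =====
-- board[r][c] (read only; B never writes)
def pvBCell (b : List (List Int)) (r c : Int) : Int :=
  PySem.List.pyGetD (PySem.List.pyGetD b r []) c 0

-- one step of B's per-cell attack loop: `if covered: v -= d; if v <= 0: dead = True`
def pvBAtkStep (r c : Int) (st : Int × Bool) (args : List Int) : Int × Bool :=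
  match args with
  | [r1, c1, r2, c2, d] =>
      if r1 ≤ r ∧ r ≤ r2 ∧ c1 ≤ c ∧ c ≤ c2 then
        (st.1 - d, st.2 || decide (st.1 - d ≤ 0))
      else st
  | _ => st

-- B's per-cell defense loop with its break; returns the final `dead` flag
def pvBDefend (v : Int) (r c : Int) : List (List Int) → Bool
  | [] => true
  | args :: rest =>
    match args with
    | [r1, c1, r2, c2, d] =>
        if r1 ≤ r ∧ r ≤ r2 ∧ c1 ≤ c ∧ c ≤ c2 then
          if 0 < v + d then false else pvBDefend (v + d) r c rest
        else pvBDefend v r c rest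
    | _ => true

-- the body of B's per-cell simulation: attack fold, then (only if dead) the defense loop
def pvBDead (attacks defenses : List (List Int)) (v0 r c : Int) : Bool :=
  let st := attacks.foldl (pvBAtkStep r c) (v0, false)
  if st.2 then pvBDefend st.1 r c defenses else false

def solution_only_destroyed_buildings_alt (board : List (List Int)) (skill : List (List Int)) : Int :=
  let N : Int := board.length
  let M : Int := (PySem.List.pyGetD board 0 []).length
  let attacks := (skill.filter (fun s => PySem.List.pyGetD s 0 0 == 1)).map
      (fun s => PySem.List.slice s (some 1) none)
  let defenses := (skill.filter (fun s => PySem.List.pyGetD s 0 0 != 1)).map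
      (fun s => PySem.List.slice s (some 1) none)
  (PySem.List.pyRange 0 N 1).foldl (fun acc r =>
    (PySem.List.pyRange 0 M 1).foldl (fun acc c =>
      if pvBDead attacks defenses (pvBCell board r c) r c then acc else acc + 1) acc) 0

-- ===== PRECONDITION & SPEC =====
-- Pre_ keeps the problem's natural domain: the board is a non-empty rectangle and skills stay
-- inside it. It excludes inputs where A raises (empty board, empty skill rows, attack rows ≠ 6
-- entries, attacked cells outside a row) and, conservatively, inputs A may survive by accident:
-- ragged boards (whose phantom cells A counts without ever reading them), attack rectangles
-- reaching outside the grid (Python's negative-index wraparound silently hits other cells), and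
-- malformed defense rows in the presence of a non-empty attack rectangle (whether A reaches the
-- malformed row then depends on the board values).
def Pre_solution_only_destroyed_buildings (board : List (List Int)) (skill : List (List Int)) : Prop :=
  board ≠ [] ∧ (∀ row ∈ board, row.length = (board.headD []).length) ∧
  (∀ s ∈ skill, s ≠ [] ∧
    (s.getD 0 0 = 1 → s.length = 6 ∧
      (s.getD 1 0 ≤ s.getD 3 0 → s.getD 2 0 ≤ s.getD 4 0 →
        0 ≤ s.getD 1 0 ∧ s.getD 3 0 < (board.length : Int) ∧
        0 ≤ s.getD 2 0 ∧ s.getD 4 0 < ((board.headD []).length : Int)))) ∧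
  ((∃ s ∈ skill, s.getD 0 0 = 1 ∧ s.getD 1 0 ≤ s.getD 3 0 ∧ s.getD 2 0 ≤ s.getD 4 0) →
    ∀ s ∈ skill, s.length = 6)

instance (board : List (List Int)) (skill : List (List Int)) :
    Decidable (Pre_solution_only_destroyed_buildings board skill) := by
  unfold Pre_solution_only_destroyed_buildings; infer_instance

def pvWitness_solution_only_destroyed_buildings : List (List Int) × List (List Int) :=
  ([[1, 2], [3, 4]], [[1, 0, 0, 1, 1, 2], [2, 0, 0, 1, 1, 1]])

def Spec_solution_only_destroyed_buildings (board : List (List Int)) (skill : List (List Int)) (out : Int) : Prop := out = solution_only_destroyed_buildings_alt board skill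
instance (board : List (List Int)) (skill : List (List Int)) (out : Int) : Decidable (Spec_solution_only_destroyed_buildings board skill out) := by unfold Spec_solution_only_destroyed_buildings; infer_instance

-- ===== CLAIM (what is proved, stated in full; the proofs are below) =====
def Claim_equal_solution_only_destroyed_buildings : Prop := ∀ (board : List (List Int)) (skill : List (List Int)), Dom_solution_only_destroyed_buildings board skill → Pre_solution_only_destroyed_buildings board skill → Spec_solution_only_destroyed_buildings board skill (solution_only_destroyed_buildings board skill)

-- ===== LEMMAS AND PROOFS =====

-- proof-only abbreviations
def pvDims (N M : Nat) (b : List (List Int)) : Prop :=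
  b.length = N ∧ ∀ row ∈ b, row.length = M

def pvValid (N M : Nat) (p : Int × Int) : Prop :=
  0 ≤ p.1 ∧ p.1 < (N : Int) ∧ 0 ≤ p.2 ∧ p.2 < (M : Int)

def pvOkArgs (a : List Int) : Prop := ∃ x1 x2 x3 x4 x5, a = [x1, x2, x3, x4, x5]

def pvOkAtk (N M : Nat) (a : List Int) : Prop :=
  ∃ r1 c1 r2 c2 d, a = [r1, c1, r2, c2, d] ∧
    (r1 ≤ r2 → c1 ≤ c2 → 0 ≤ r1 ∧ r2 < (N : Int) ∧ 0 ≤ c1 ∧ c2 < (M : Int))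

lemma pvBCell_eq_pvACell (b : List (List Int)) (r c : Int) : pvBCell b r c = pvACell b r c := rfl

lemma pvASet_dims {N M : Nat} {b : List (List Int)} (hb : pvDims N M b) (r c v : Int)
    (hr : 0 ≤ r) (hrN : r < (N : Int)) : pvDims N M (pvASet b r c v) := by
  obtain ⟨hlen, hrows⟩ := hb
  have hrb : r < (b.length : Int) := by rw [hlen]; exact hrN
  have hrb' : r.toNat < b.length := by omega
  constructor
  · unfold pvASet; rw [PySem.List.length_pySetD]; exact hlen
  · intro row hrow
    unfold pvASet at hrow
    rw [PySem.List.pySetD_of_nonneg _ _ hr] at hrow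
    rcases List.mem_or_eq_of_mem_set hrow with h | h
    · exact hrows _ h
    · subst h
      rw [PySem.List.length_pySetD, PySem.List.pyGetD_eq_getElem b [] hr hrb]
      exact hrows _ (List.getElem_mem hrb')

lemma pvACell_pvASet {N M : Nat} {b : List (List Int)} (hb : pvDims N M b) (r c v : Int)
    (hr : 0 ≤ r) (hrN : r < (N : Int)) (hc : 0 ≤ c) (hcM : c < (M : Int))
    (r' c' : Int) (hr' : 0 ≤ r') (hrN' : r' < (N : Int)) (hc' : 0 ≤ c') (hcM' : c' < (M : Int)) :
    pvACell (pvASet b r c v) r' c' = if r' = r ∧ c' = c then v else pvACell b r' c' := by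
  obtain ⟨hlen, hrows⟩ := hb
  have hrb : r < (b.length : Int) := by rw [hlen]; exact hrN
  have hrb2 : r.toNat < b.length := by omega
  have hrb' : r' < (b.length : Int) := by rw [hlen]; exact hrN'
  have hrb2' : r'.toNat < b.length := by omega
  have hrow : b[r.toNat].length = M := hrows _ (List.getElem_mem hrb2)
  have hrow' : b[r'.toNat].length = M := hrows _ (List.getElem_mem hrb2')
  have hcb : c < (b[r.toNat].length : Int) := by rw [hrow]; exact hcM
  have hcb' : c' < (b[r'.toNat].length : Int) := by rw [hrow']; exact hcM'
  unfold pvASet pvACell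
  rw [PySem.List.pyGetD_eq_getElem b [] hr hrb, PySem.List.pySetD_of_nonneg _ _ hc,
      PySem.List.pySetD_of_nonneg _ _ hr]
  have hlenset : r' < ((b.set r.toNat (b[r.toNat].set c.toNat v)).length : Int) := by
    rw [List.length_set]; exact hrb'
  rw [PySem.List.pyGetD_eq_getElem _ [] hr' hlenset,
      PySem.List.pyGetD_eq_getElem b [] hr' hrb']
  by_cases hrr : r' = r
  · subst hrr
    have hset : (b.set r'.toNat (b[r'.toNat].set c.toNat v))[r'.toNat] =
        b[r'.toNat].set c.toNat v := by
      rw [List.getElem_set, if_pos rfl]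
    rw [hset]
    have hcset : c' < ((b[r'.toNat].set c.toNat v).length : Int) := by
      rw [List.length_set]; exact hcb'
    rw [PySem.List.pyGetD_eq_getElem _ 0 hc' hcset,
        PySem.List.pyGetD_eq_getElem _ 0 hc' hcb', List.getElem_set]
    by_cases hcc : c' = c
    · subst hcc
      rw [if_pos rfl, if_pos ⟨rfl, rfl⟩]
    · have hne : c.toNat ≠ c'.toNat := by omega
      rw [if_neg hne, if_neg (fun h => hcc h.2)]
  · have hne : r.toNat ≠ r'.toNat := by omega
    rw [List.getElem_set, if_neg hne,
        PySem.List.pyGetD_eq_getElem _ 0 hc' hcb', if_neg (fun h => hrr h.1)]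

-- ---- attack phase, innermost (column) loop over an arbitrary nodup column list ----
lemma pvA_colFold {N M : Nat} (deg r : Int) (hr : 0 ≤ r) (hrN : r < (N : Int)) :
    ∀ (cs : List Int), cs.Nodup → (∀ c ∈ cs, 0 ≤ c ∧ c < (M : Int)) →
    ∀ (b : List (List Int)) (s : PySem.Set (Int × Int)), pvDims N M b →
      pvDims N M (List.foldl (pvAAtkCell deg r) (b, s) cs).1 ∧
      (∀ r' c', 0 ≤ r' → r' < (N : Int) → 0 ≤ c' → c' < (M : Int) →
        pvACell (List.foldl (pvAAtkCell deg r) (b, s) cs).1 r' c' =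
          if r' = r ∧ c' ∈ cs then pvACell b r' c' - deg else pvACell b r' c') ∧
      (∀ p : Int × Int, p ∈ (List.foldl (pvAAtkCell deg r) (b, s) cs).2 ↔
        p ∈ s ∨ (p.1 = r ∧ p.2 ∈ cs ∧ pvACell b r p.2 - deg ≤ 0)) ∧
      (s.Nodup → (List.foldl (pvAAtkCell deg r) (b, s) cs).2.Nodup) := by
  intro cs
  induction cs with
  | nil => intro _ _ b s hb; simp [hb]
  | cons c0 t ih =>
    intro hnd hbounds b s hb
    obtain ⟨hc0, hc0M⟩ := hbounds c0 (List.mem_cons_self)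
    have hnd' := List.nodup_cons.mp hnd
    have hstep : List.foldl (pvAAtkCell deg r) (b, s) (c0 :: t) =
        List.foldl (pvAAtkCell deg r)
          (pvASet b r c0 (pvACell b r c0 - deg),
           if pvACell b r c0 - deg ≤ 0 then PySem.Set.add s (r, c0) else s) t := rfl
    set b1 := pvASet b r c0 (pvACell b r c0 - deg) with hb1def
    set s1 := if pvACell b r c0 - deg ≤ 0 then PySem.Set.add s (r, c0) else s with hs1def
    have hb1 : pvDims N M b1 := pvASet_dims hb _ _ _ hr hrN
    have hcell1 : ∀ r' c', 0 ≤ r' → r' < (N : Int) → 0 ≤ c' → c' < (M : Int) →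
        pvACell b1 r' c' = if r' = r ∧ c' = c0 then pvACell b r c0 - deg else pvACell b r' c' := by
      intro r' c' h1 h2 h3 h4
      rw [hb1def, pvACell_pvASet hb r c0 _ hr hrN hc0 hc0M r' c' h1 h2 h3 h4]
    have hmem1 : ∀ p : Int × Int, p ∈ s1 ↔ p ∈ s ∨ (p = (r, c0) ∧ pvACell b r c0 - deg ≤ 0) := by
      intro p
      rw [hs1def]
      by_cases hv : pvACell b r c0 - deg ≤ 0
      · simp only [if_pos hv]
        rw [PySem.Set.mem_add]
        tauto
      · simp only [if_neg hv]; tauto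
    have hnd1 : s.Nodup → s1.Nodup := by
      intro h
      rw [hs1def]
      by_cases hv : pvACell b r c0 - deg ≤ 0
      · simp only [if_pos hv]; exact PySem.Set.nodup_add s (r, c0) h
      · simp only [if_neg hv]; exact h
    obtain ⟨ihd, ihv, ihm, ihn⟩ := ih hnd'.2 (fun c hcm => hbounds c (List.mem_cons_of_mem _ hcm)) b1 s1 hb1
    rw [hstep]
    refine ⟨ihd, ?_, ?_, ?_⟩
    · intro r' c' h1 h2 h3 h4
      rw [ihv r' c' h1 h2 h3 h4, hcell1 r' c' h1 h2 h3 h4]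
      by_cases hrr : r' = r
      · subst hrr
        by_cases hcc : c' = c0
        · subst hcc
          have hnt : c' ∉ t := hnd'.1
          simp [hnt]
        · by_cases hct : c' ∈ t <;> simp [hcc, hct]
      · simp [hrr]
    · intro p
      rw [ihm p, hmem1 p]
      have hbval : ∀ hpt : p.2 ∈ t, pvACell b1 r p.2 = pvACell b r p.2 := by
        intro hpt
        obtain ⟨hp1, hp2⟩ := hbounds p.2 (List.mem_cons_of_mem _ hpt)
        rw [hcell1 r p.2 hr hrN hp1 hp2]
        have : ¬(p.2 = c0) := fun h => hnd'.1 (h ▸ hpt)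
        simp [this]
      constructor
      · rintro ((hs | ⟨hpe, hle⟩) | ⟨hp1, hpt, hle⟩)
        · exact Or.inl hs
        · subst hpe
          exact Or.inr ⟨rfl, List.mem_cons_self, hle⟩
        · rw [hbval hpt] at hle
          exact Or.inr ⟨hp1, List.mem_cons_of_mem _ hpt, hle⟩
      · rintro (hs | ⟨hp1, hpt, hle⟩)
        · exact Or.inl (Or.inl hs)
        · rcases List.mem_cons.mp hpt with he | ht
          · refine Or.inl (Or.inr ⟨?_, ?_⟩)
            · rcases p with ⟨pa, pb⟩
              simp_all
            · rw [← he]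
              exact hle
          · refine Or.inr ⟨hp1, ht, ?_⟩
            rw [hbval ht]
            exact hle
    · intro hs
      exact ihn (hnd1 hs)

-- ---- attack phase, row loop ----
lemma pvA_rowFold {N M : Nat} (c1 c2 deg : Int)
    (hcs : ∀ c, c1 ≤ c → c ≤ c2 → 0 ≤ c ∧ c < (M : Int)) :
    ∀ (rs : List Int), rs.Nodup → (∀ r ∈ rs, 0 ≤ r ∧ r < (N : Int)) →
    ∀ (b : List (List Int)) (s : PySem.Set (Int × Int)), pvDims N M b →
      pvDims N M (List.foldl (pvAAtkRow c1 c2 deg) (b, s) rs).1 ∧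
      (∀ r' c', 0 ≤ r' → r' < (N : Int) → 0 ≤ c' → c' < (M : Int) →
        pvACell (List.foldl (pvAAtkRow c1 c2 deg) (b, s) rs).1 r' c' =
          if r' ∈ rs ∧ c1 ≤ c' ∧ c' ≤ c2 then pvACell b r' c' - deg else pvACell b r' c') ∧
      (∀ p : Int × Int, p ∈ (List.foldl (pvAAtkRow c1 c2 deg) (b, s) rs).2 ↔
        p ∈ s ∨ (p.1 ∈ rs ∧ c1 ≤ p.2 ∧ p.2 ≤ c2 ∧ pvACell b p.1 p.2 - deg ≤ 0)) ∧
      (s.Nodup → (List.foldl (pvAAtkRow c1 c2 deg) (b, s) rs).2.Nodup) := by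
  intro rs
  induction rs with
  | nil => intro _ _ b s hb; simp [hb]
  | cons r0 t ih =>
    intro hnd hbounds b s hb
    obtain ⟨hr0, hr0N⟩ := hbounds r0 (List.mem_cons_self)
    have hnd' := List.nodup_cons.mp hnd
    have hmemc : ∀ c : Int, c ∈ PySem.List.pyRange c1 (c2 + 1) ↔ c1 ≤ c ∧ c ≤ c2 := by
      intro c
      rw [PySem.List.mem_pyRange_one]
      omega
    obtain ⟨h1d, h1v, h1m, h1n⟩ :=
      pvA_colFold (M := M) deg r0 hr0 hr0N (PySem.List.pyRange c1 (c2 + 1))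
        (PySem.List.nodup_pyRange_one c1 (c2 + 1))
        (fun c hc => hcs c ((hmemc c).mp hc).1 ((hmemc c).mp hc).2) b s hb
    have hstep : List.foldl (pvAAtkRow c1 c2 deg) (b, s) (r0 :: t) =
        List.foldl (pvAAtkRow c1 c2 deg)
          (List.foldl (pvAAtkCell deg r0) (b, s) (PySem.List.pyRange c1 (c2 + 1))) t := rfl
    set st1 := List.foldl (pvAAtkCell deg r0) (b, s) (PySem.List.pyRange c1 (c2 + 1)) with hst1
    obtain ⟨ihd, ihv, ihm, ihn⟩ := ih hnd'.2 (fun x hx => hbounds x (List.mem_cons_of_mem _ hx)) st1.1 st1.2 h1d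
    rw [hstep]
    have hfold : List.foldl (pvAAtkRow c1 c2 deg) st1 t =
        List.foldl (pvAAtkRow c1 c2 deg) (st1.1, st1.2) t := by rw [Prod.mk.eta]
    rw [hfold]
    refine ⟨ihd, ?_, ?_, ?_⟩
    · intro r' c' a1 a2 a3 a4
      rw [ihv r' c' a1 a2 a3 a4, h1v r' c' a1 a2 a3 a4]
      by_cases hcc : c1 ≤ c' ∧ c' ≤ c2
      · have hcr : c' ∈ PySem.List.pyRange c1 (c2 + 1) := (hmemc c').mpr hcc
        by_cases hrt : r' ∈ t
        · have hne : ¬(r' = r0) := fun h => hnd'.1 (h ▸ hrt)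
          rw [if_pos (show r' ∈ t ∧ c1 ≤ c' ∧ c' ≤ c2 from ⟨hrt, hcc.1, hcc.2⟩),
              if_neg (show ¬(r' = r0 ∧ c' ∈ PySem.List.pyRange c1 (c2 + 1)) from
                fun hx => hne hx.1),
              if_pos (show r' ∈ r0 :: t ∧ c1 ≤ c' ∧ c' ≤ c2 from
                ⟨List.mem_cons_of_mem _ hrt, hcc.1, hcc.2⟩)]
        · by_cases hre : r' = r0
          · rw [if_neg (show ¬(r' ∈ t ∧ c1 ≤ c' ∧ c' ≤ c2) from fun hx => hrt hx.1),
                if_pos (show r' = r0 ∧ c' ∈ PySem.List.pyRange c1 (c2 + 1) from ⟨hre, hcr⟩),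
                if_pos (show r' ∈ r0 :: t ∧ c1 ≤ c' ∧ c' ≤ c2 from
                  ⟨by rw [hre]; exact List.mem_cons_self, hcc.1, hcc.2⟩)]
          · rw [if_neg (show ¬(r' ∈ t ∧ c1 ≤ c' ∧ c' ≤ c2) from fun hx => hrt hx.1),
                if_neg (show ¬(r' = r0 ∧ c' ∈ PySem.List.pyRange c1 (c2 + 1)) from
                  fun hx => hre hx.1),
                if_neg (show ¬(r' ∈ r0 :: t ∧ c1 ≤ c' ∧ c' ≤ c2) from
                  fun hx => (List.mem_cons.mp hx.1).elim hre hrt)]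
      · have hcr : c' ∉ PySem.List.pyRange c1 (c2 + 1) := fun h => hcc ((hmemc c').mp h)
        rw [if_neg (show ¬(r' ∈ t ∧ c1 ≤ c' ∧ c' ≤ c2) from fun hx => hcc ⟨hx.2.1, hx.2.2⟩),
            if_neg (show ¬(r' = r0 ∧ c' ∈ PySem.List.pyRange c1 (c2 + 1)) from
              fun hx => hcr hx.2),
            if_neg (show ¬(r' ∈ r0 :: t ∧ c1 ≤ c' ∧ c' ≤ c2) from
              fun hx => hcc ⟨hx.2.1, hx.2.2⟩)]
    · intro p
      rw [ihm p, h1m p, hmemc p.2]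
      have hval : ∀ (h1 : p.1 ∈ t) (h2 : c1 ≤ p.2) (h3 : p.2 ≤ c2),
          pvACell st1.1 p.1 p.2 = pvACell b p.1 p.2 := by
        intro h1 h2 h3
        obtain ⟨b1, b2⟩ := hbounds p.1 (List.mem_cons_of_mem _ h1)
        obtain ⟨b3, b4⟩ := hcs p.2 h2 h3
        rw [h1v p.1 p.2 b1 b2 b3 b4]
        have hne : ¬(p.1 = r0) := fun h => hnd'.1 (h ▸ h1)
        rw [if_neg (fun hx => hne hx.1)]
      constructor
      · rintro (⟨hs | ⟨e1, e2, e3⟩⟩ | ⟨ht, e2, e3, e4⟩)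
        · exact Or.inl hs
        · refine Or.inr ⟨by rw [e1]; exact List.mem_cons_self, e2.1, e2.2, ?_⟩
          rw [e1]
          exact e3
        · rw [hval ht e2 e3] at e4
          exact Or.inr ⟨List.mem_cons_of_mem _ ht, e2, e3, e4⟩
      · rintro (hs | ⟨hmem, e2, e3, e4⟩)
        · exact Or.inl (Or.inl hs)
        · rcases List.mem_cons.mp hmem with he | ht
          · refine Or.inl (Or.inr ⟨he, ⟨e2, e3⟩, ?_⟩)
            rw [← he]
            exact e4
          · exact Or.inr ⟨ht, e2, e3, by rw [hval ht e2 e3]; exact e4⟩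
    · intro hs
      exact ihn (h1n hs)

-- ---- one whole attack skill ----
lemma pvA_attack_one {N M : Nat} (r1 c1 r2 c2 deg : Int)
    (hok : r1 ≤ r2 → c1 ≤ c2 → 0 ≤ r1 ∧ r2 < (N : Int) ∧ 0 ≤ c1 ∧ c2 < (M : Int))
    (b : List (List Int)) (s : PySem.Set (Int × Int)) (hb : pvDims N M b) :
    pvDims N M (pvAAttack (b, s) [r1, c1, r2, c2, deg]).1 ∧
    (∀ r' c', 0 ≤ r' → r' < (N : Int) → 0 ≤ c' → c' < (M : Int) →
      pvACell (pvAAttack (b, s) [r1, c1, r2, c2, deg]).1 r' c' =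
        if r1 ≤ r' ∧ r' ≤ r2 ∧ c1 ≤ c' ∧ c' ≤ c2 then pvACell b r' c' - deg
        else pvACell b r' c') ∧
    (∀ p : Int × Int, p ∈ (pvAAttack (b, s) [r1, c1, r2, c2, deg]).2 ↔
      p ∈ s ∨ (r1 ≤ p.1 ∧ p.1 ≤ r2 ∧ c1 ≤ p.2 ∧ p.2 ≤ c2 ∧ pvACell b p.1 p.2 - deg ≤ 0)) ∧
    (s.Nodup → (pvAAttack (b, s) [r1, c1, r2, c2, deg]).2.Nodup) := by
  have hA : pvAAttack (b, s) [r1, c1, r2, c2, deg] =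
      List.foldl (pvAAtkRow c1 c2 deg) (b, s) (PySem.List.pyRange r1 (r2 + 1)) := rfl
  by_cases hcc : c1 ≤ c2
  · by_cases hrr : r1 ≤ r2
    · obtain ⟨e1, e2, e3, e4⟩ := hok hrr hcc
      have hmemr : ∀ r : Int, r ∈ PySem.List.pyRange r1 (r2 + 1) ↔ r1 ≤ r ∧ r ≤ r2 := by
        intro r; rw [PySem.List.mem_pyRange_one]; omega
      obtain ⟨hd, hv, hm, hn⟩ :=
        pvA_rowFold (N := N) c1 c2 deg (fun c a1 a2 => ⟨by omega, by omega⟩)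
          (PySem.List.pyRange r1 (r2 + 1)) (PySem.List.nodup_pyRange_one r1 (r2 + 1))
          (fun r hrm => ⟨by have := (hmemr r).mp hrm; omega, by have := (hmemr r).mp hrm; omega⟩)
          b s hb
      rw [hA]
      refine ⟨hd, ?_, ?_, hn⟩
      · intro r' c' a1 a2 a3 a4
        rw [hv r' c' a1 a2 a3 a4]
        refine if_congr ?_ rfl rfl
        rw [hmemr r']
        tauto
      · intro p
        rw [hm p, hmemr p.1]
        tauto
    · have hnil : PySem.List.pyRange r1 (r2 + 1) = [] :=
        PySem.List.pyRange_one_eq_nil (by omega)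
      rw [hA, hnil]
      simp only [List.foldl_nil]
      refine ⟨hb, ?_, ?_, fun h => h⟩
      · intro r' c' _ _ _ _
        rw [if_neg (by omega)]
      · intro p
        constructor
        · exact fun h => Or.inl h
        · rintro (h | h)
          · exact h
          · omega
  · have hinner : ∀ st r, pvAAtkRow c1 c2 deg st r = st := by
      intro st r
      unfold pvAAtkRow
      rw [PySem.List.pyRange_one_eq_nil (by omega)]
      simp
    rw [hA, PySem.List.foldl_congr_mem _ _ (fun acc _ => acc) _ (fun acc x _ => hinner acc x),
        PySem.List.foldl_ignore]
    refine ⟨hb, ?_, ?_, fun h => h⟩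
    · intro r' c' _ _ _ _
      rw [if_neg (by omega)]
    · intro p
      constructor
      · exact fun h => Or.inl h
      · rintro (h | h)
        · exact h
        · omega

-- ---- B's attack step: the flag is only ever OR-ed in, the value ignores the flag ----
lemma pvBAtkStep_pair (r c v : Int) (d : Bool) (a : List Int) :
    pvBAtkStep r c (v, d) a =
      ((pvBAtkStep r c (v, false) a).1, d || (pvBAtkStep r c (v, false) a).2) := by
  rcases a with _ | ⟨x1, a⟩; · simp [pvBAtkStep]
  rcases a with _ | ⟨x2, a⟩; · simp [pvBAtkStep]
  rcases a with _ | ⟨x3, a⟩; · simp [pvBAtkStep]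
  rcases a with _ | ⟨x4, a⟩; · simp [pvBAtkStep]
  rcases a with _ | ⟨x5, a⟩; · simp [pvBAtkStep]
  rcases a with _ | ⟨x6, a⟩
  · by_cases h : x1 ≤ r ∧ r ≤ x3 ∧ x2 ≤ c ∧ c ≤ x4 <;> simp [pvBAtkStep, h]
  · simp [pvBAtkStep]

lemma pvBAtk_foldl_fst (as : List (List Int)) :
    ∀ (v : Int) (d : Bool) (r c : Int),
      (List.foldl (pvBAtkStep r c) (v, d) as).1 = (List.foldl (pvBAtkStep r c) (v, false) as).1 := by
  induction as with
  | nil => intro v d r c; rfl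
  | cons a t ih =>
    intro v d r c
    simp only [List.foldl_cons]
    rw [pvBAtkStep_pair r c v d a]
    rcases hst : pvBAtkStep r c (v, false) a with ⟨v1, f1⟩
    simp only
    rw [ih v1 (d || f1) r c, ih v1 f1 r c]

lemma pvBAtk_foldl_snd (as : List (List Int)) :
    ∀ (v : Int) (d : Bool) (r c : Int),
      (List.foldl (pvBAtkStep r c) (v, d) as).2 =
        (d || (List.foldl (pvBAtkStep r c) (v, false) as).2) := by
  induction as with
  | nil => intro v d r c; simp
  | cons a t ih =>
    intro v d r c
    simp only [List.foldl_cons]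
    rw [pvBAtkStep_pair r c v d a]
    rcases hst : pvBAtkStep r c (v, false) a with ⟨v1, f1⟩
    simp only
    rw [ih v1 (d || f1) r c, ih v1 f1 r c, Bool.or_assoc]

-- ---- whole attack phase vs B's per-cell attack fold ----
lemma pvA_atkList {N M : Nat} :
    ∀ (as : List (List Int)), (∀ a ∈ as, pvOkAtk N M a) →
    ∀ (b : List (List Int)) (s : PySem.Set (Int × Int)), pvDims N M b →
      pvDims N M (List.foldl pvAAttack (b, s) as).1 ∧
      (∀ r c, 0 ≤ r → r < (N : Int) → 0 ≤ c → c < (M : Int) →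
        pvACell (List.foldl pvAAttack (b, s) as).1 r c =
          (List.foldl (pvBAtkStep r c) (pvACell b r c, false) as).1) ∧
      (∀ p : Int × Int, p ∈ (List.foldl pvAAttack (b, s) as).2 ↔
        p ∈ s ∨ (pvValid N M p ∧
          (List.foldl (pvBAtkStep p.1 p.2) (pvACell b p.1 p.2, false) as).2 = true)) ∧
      (s.Nodup → (List.foldl pvAAttack (b, s) as).2.Nodup) := by
  intro as
  induction as with
  | nil => intro _ b s hb; simp [hb]
  | cons a t ih =>
    intro hok b s hb
    obtain ⟨r1, c1, r2, c2, deg, ha, hbd⟩ := hok a (List.mem_cons_self)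
    subst ha
    obtain ⟨h1d, h1v, h1m, h1n⟩ := pvA_attack_one r1 c1 r2 c2 deg hbd b s hb
    have hstep : List.foldl pvAAttack (b, s) ([r1, c1, r2, c2, deg] :: t) =
        List.foldl pvAAttack (pvAAttack (b, s) [r1, c1, r2, c2, deg]) t := rfl
    set st1 := pvAAttack (b, s) [r1, c1, r2, c2, deg] with hst1
    obtain ⟨ihd, ihv, ihm, ihn⟩ := ih (fun x hx => hok x (List.mem_cons_of_mem _ hx)) st1.1 st1.2 h1d
    rw [hstep, show st1 = (st1.1, st1.2) from rfl]
    have hBstep : ∀ r c : Int, pvBAtkStep r c (pvACell b r c, false) [r1, c1, r2, c2, deg] =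
        (if r1 ≤ r ∧ r ≤ r2 ∧ c1 ≤ c ∧ c ≤ c2 then
          (pvACell b r c - deg, decide (pvACell b r c - deg ≤ 0))
        else (pvACell b r c, false)) := by
      intro r c
      rfl
    refine ⟨ihd, ?_, ?_, fun hs => ihn (h1n hs)⟩
    · intro r c a1 a2 a3 a4
      rw [ihv r c a1 a2 a3 a4, h1v r c a1 a2 a3 a4]
      simp only [List.foldl_cons]
      rw [hBstep r c]
      by_cases h : r1 ≤ r ∧ r ≤ r2 ∧ c1 ≤ c ∧ c ≤ c2
      · rw [if_pos h, if_pos ⟨h.1, h.2.1, h.2.2.1, h.2.2.2⟩]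
        exact (pvBAtk_foldl_fst t (pvACell b r c - deg)
          (decide (pvACell b r c - deg ≤ 0)) r c).symm
      · rw [if_neg h, if_neg (by tauto)]
    · intro p
      rw [ihm p]
      simp only [List.foldl_cons]
      rw [hBstep p.1 p.2]
      have hval : pvValid N M p → pvACell st1.1 p.1 p.2 =
          (if r1 ≤ p.1 ∧ p.1 ≤ r2 ∧ c1 ≤ p.2 ∧ p.2 ≤ c2 then pvACell b p.1 p.2 - deg
           else pvACell b p.1 p.2) := by
        rintro ⟨v1, v2, v3, v4⟩
        rw [h1v p.1 p.2 v1 v2 v3 v4]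
      have hvalidRect : (r1 ≤ p.1 ∧ p.1 ≤ r2 ∧ c1 ≤ p.2 ∧ p.2 ≤ c2) → pvValid N M p := by
        rintro ⟨e1, e2, e3, e4⟩
        obtain ⟨g1, g2, g3, g4⟩ := hbd (by omega) (by omega)
        exact ⟨by omega, by omega, by omega, by omega⟩
      by_cases h : r1 ≤ p.1 ∧ p.1 ≤ r2 ∧ c1 ≤ p.2 ∧ p.2 ≤ c2
      · rw [if_pos h]
        have hvp := hvalidRect h
        rw [h1m p]
        rw [pvBAtk_foldl_snd t (pvACell b p.1 p.2 - deg) (decide (pvACell b p.1 p.2 - deg ≤ 0)) p.1 p.2]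
        have hv1 : pvValid N M p → pvACell st1.1 p.1 p.2 = pvACell b p.1 p.2 - deg := by
          intro hvp'
          rw [hval hvp', if_pos h]
        constructor
        · rintro (⟨hs | ⟨e1, e2, e3, e4, e5⟩⟩ | ⟨hvp', hflag⟩)
          · exact Or.inl hs
          · exact Or.inr ⟨hvp, by simp [e5]⟩
          · refine Or.inr ⟨hvp', ?_⟩
            rw [hv1 hvp'] at hflag
            simp [hflag]
        · rintro (hs | ⟨hvp', hflag⟩)
          · exact Or.inl (Or.inl hs)
          · simp only [Bool.or_eq_true, decide_eq_true_eq] at hflag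
            rcases hflag with hle | hflag
            · exact Or.inl (Or.inr ⟨h.1, h.2.1, h.2.2.1, h.2.2.2, hle⟩)
            · exact Or.inr ⟨hvp', by rw [hv1 hvp']; exact hflag⟩
      · rw [if_neg h]
        rw [h1m p]
        have hv1 : pvValid N M p → pvACell st1.1 p.1 p.2 = pvACell b p.1 p.2 := by
          intro hvp'
          rw [hval hvp', if_neg h]
        constructor
        · rintro (⟨hs | ⟨e1, e2, e3, e4, e5⟩⟩ | ⟨hvp', hflag⟩)
          · exact Or.inl hs
          · exact absurd ⟨e1, e2, e3, e4⟩ h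
          · exact Or.inr ⟨hvp', by rw [hv1 hvp'] at hflag; exact hflag⟩
        · rintro (hs | ⟨hvp', hflag⟩)
          · exact Or.inl (Or.inl hs)
          · exact Or.inr ⟨hvp', by rw [hv1 hvp']; exact hflag⟩

-- ---- one destroyed cell's defense loop vs B's ----
lemma pvA_defend_one {N M : Nat} :
    ∀ (ds : List (List Int)), (∀ a ∈ ds, pvOkArgs a) →
    ∀ (r c : Int), pvValid N M (r, c) →
    ∀ (b : List (List Int)) (fin : PySem.Set (Int × Int)), pvDims N M b →
      pvDims N M (pvADefend ds b fin r c).1 ∧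
      (∀ r' c', 0 ≤ r' → r' < (N : Int) → 0 ≤ c' → c' < (M : Int) → ¬(r' = r ∧ c' = c) →
        pvACell (pvADefend ds b fin r c).1 r' c' = pvACell b r' c') ∧
      (∀ p : Int × Int, p ∈ (pvADefend ds b fin r c).2 ↔
        (p ∈ fin ∧ (p = (r, c) → pvBDefend (pvACell b r c) r c ds = true))) ∧
      (fin.Nodup → (pvADefend ds b fin r c).2.Nodup) := by
  intro ds
  induction ds with
  | nil =>
    intro _ r c _ b fin hb
    refine ⟨hb, fun _ _ _ _ _ _ _ => rfl, ?_, fun h => h⟩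
    intro p
    simp [pvADefend, pvBDefend]
  | cons a t ih =>
    intro hok r c hv b fin hb
    obtain ⟨x1, x2, x3, x4, x5, ha⟩ := hok a (List.mem_cons_self)
    subst ha
    obtain ⟨v1, v2, v3, v4⟩ := hv
    have hredAll : pvADefend ([x1, x2, x3, x4, x5] :: t) b fin r c =
        (if x1 ≤ r ∧ r ≤ x3 ∧ x2 ≤ c ∧ c ≤ x4 then
          (if 0 < pvACell b r c + x5 then
            (pvASet b r c (pvACell b r c + x5), PySem.Set.discard fin (r, c))
          else pvADefend t (pvASet b r c (pvACell b r c + x5)) fin r c)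
        else pvADefend t b fin r c) := rfl
    have hBredAll : pvBDefend (pvACell b r c) r c ([x1, x2, x3, x4, x5] :: t) =
        (if x1 ≤ r ∧ r ≤ x3 ∧ x2 ≤ c ∧ c ≤ x4 then
          (if 0 < pvACell b r c + x5 then false
           else pvBDefend (pvACell b r c + x5) r c t)
        else pvBDefend (pvACell b r c) r c t) := rfl
    by_cases hcov : x1 ≤ r ∧ r ≤ x3 ∧ x2 ≤ c ∧ c ≤ x4
    · by_cases hpos : 0 < pvACell b r c + x5
      · have hred : pvADefend ([x1, x2, x3, x4, x5] :: t) b fin r c =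
            (pvASet b r c (pvACell b r c + x5), PySem.Set.discard fin (r, c)) := by
          rw [hredAll, if_pos hcov, if_pos hpos]
        have hBred : pvBDefend (pvACell b r c) r c ([x1, x2, x3, x4, x5] :: t) = false := by
          rw [hBredAll, if_pos hcov, if_pos hpos]
        rw [hred]
        refine ⟨pvASet_dims hb _ _ _ v1 v2, ?_, ?_, ?_⟩
        · intro r' c' a1 a2 a3 a4 hne
          rw [pvACell_pvASet hb r c _ v1 v2 v3 v4 r' c' a1 a2 a3 a4, if_neg hne]
        · intro p
          simp only
          rw [PySem.Set.mem_discard, hBred]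
          constructor
          · rintro ⟨h1, h2⟩
            exact ⟨h1, fun he => absurd he h2⟩
          · rintro ⟨h1, h2⟩
            refine ⟨h1, fun he => by simpa using h2 he⟩
        · intro h
          exact PySem.Set.nodup_discard fin (r, c) h
      · have hred : pvADefend ([x1, x2, x3, x4, x5] :: t) b fin r c =
            pvADefend t (pvASet b r c (pvACell b r c + x5)) fin r c := by
          rw [hredAll, if_pos hcov, if_neg hpos]
        have hBred : pvBDefend (pvACell b r c) r c ([x1, x2, x3, x4, x5] :: t) =
            pvBDefend (pvACell b r c + x5) r c t := by
          rw [hBredAll, if_pos hcov, if_neg hpos]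
        set b1 := pvASet b r c (pvACell b r c + x5) with hb1
        have hb1d : pvDims N M b1 := pvASet_dims hb _ _ _ v1 v2
        have hcell : pvACell b1 r c = pvACell b r c + x5 := by
          rw [hb1, pvACell_pvASet hb r c _ v1 v2 v3 v4 r c v1 v2 v3 v4, if_pos ⟨rfl, rfl⟩]
        obtain ⟨ihd, ihv, ihm, ihn⟩ :=
          ih (fun x hx => hok x (List.mem_cons_of_mem _ hx)) r c ⟨v1, v2, v3, v4⟩ b1 fin hb1d
        rw [hred]
        refine ⟨ihd, ?_, ?_, ihn⟩
        · intro r' c' a1 a2 a3 a4 hne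
          rw [ihv r' c' a1 a2 a3 a4 hne,
              pvACell_pvASet hb r c _ v1 v2 v3 v4 r' c' a1 a2 a3 a4, if_neg hne]
        · intro p
          rw [ihm p, hBred, hcell]
    · have hred : pvADefend ([x1, x2, x3, x4, x5] :: t) b fin r c =
          pvADefend t b fin r c := by
        rw [hredAll, if_neg hcov]
      have hBred : pvBDefend (pvACell b r c) r c ([x1, x2, x3, x4, x5] :: t) =
          pvBDefend (pvACell b r c) r c t := by
        rw [hBredAll, if_neg hcov]
      obtain ⟨ihd, ihv, ihm, ihn⟩ :=
        ih (fun x hx => hok x (List.mem_cons_of_mem _ hx)) r c ⟨v1, v2, v3, v4⟩ b fin hb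
      rw [hred]
      refine ⟨ihd, ihv, ?_, ihn⟩
      intro p
      rw [ihm p, hBred]

-- ---- the whole defense phase over the destroyed list ----
lemma pvA_defFold {N M : Nat} (ds : List (List Int)) (hok : ∀ a ∈ ds, pvOkArgs a)
    (atkv : Int × Int → Int) :
    ∀ (ps : List (Int × Int)), ps.Nodup → (∀ p ∈ ps, pvValid N M p) →
    ∀ (b : List (List Int)) (fin : PySem.Set (Int × Int)), pvDims N M b →
      (∀ p ∈ ps, pvACell b p.1 p.2 = atkv p) →
      (∀ x : Int × Int,
        x ∈ (List.foldl (fun (q : List (List Int) × PySem.Set (Int × Int)) p =>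
          pvADefend ds q.1 q.2 p.1 p.2) (b, fin) ps).2 ↔
          (x ∈ fin ∧ (x ∈ ps → pvBDefend (atkv x) x.1 x.2 ds = true))) ∧
      (fin.Nodup →
        (List.foldl (fun (q : List (List Int) × PySem.Set (Int × Int)) p =>
          pvADefend ds q.1 q.2 p.1 p.2) (b, fin) ps).2.Nodup) := by
  intro ps
  induction ps with
  | nil =>
    intro _ _ b fin hb _
    simp
  | cons p0 t ih =>
    intro hnd hvl b fin hb hcv
    have hnd' := List.nodup_cons.mp hnd
    have hv0 : pvValid N M (p0.1, p0.2) := hvl p0 List.mem_cons_self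
    obtain ⟨h1d, h1v, h1m, h1n⟩ := pvA_defend_one ds hok p0.1 p0.2 hv0 b fin hb
    have hstep : List.foldl (fun (q : List (List Int) × PySem.Set (Int × Int)) p =>
        pvADefend ds q.1 q.2 p.1 p.2) (b, fin) (p0 :: t) =
        List.foldl (fun (q : List (List Int) × PySem.Set (Int × Int)) p =>
          pvADefend ds q.1 q.2 p.1 p.2) (pvADefend ds b fin p0.1 p0.2) t := rfl
    set q1 := pvADefend ds b fin p0.1 p0.2 with hq1
    obtain ⟨ihm, ihn⟩ := ih hnd'.2 (fun x hx => hvl x (List.mem_cons_of_mem _ hx)) q1.1 q1.2 h1d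
      (by
        intro p hp
        have hne : ¬(p.1 = p0.1 ∧ p.2 = p0.2) := by
          intro ⟨e1, e2⟩
          exact hnd'.1 (by rcases p with ⟨pa, pb⟩; rcases p0 with ⟨qa, qb⟩; simp_all)
        obtain ⟨w1, w2, w3, w4⟩ := hvl p (List.mem_cons_of_mem _ hp)
        rw [h1v p.1 p.2 w1 w2 w3 w4 hne]
        exact hcv p (List.mem_cons_of_mem _ hp))
    rw [hstep, show q1 = (q1.1, q1.2) from rfl]
    constructor
    · intro x
      rw [ihm x, h1m x]
      have hA0 : pvACell b p0.1 p0.2 = atkv p0 := hcv p0 (List.mem_cons_self)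
      constructor
      · rintro ⟨⟨hf, himp⟩, himp2⟩
        refine ⟨hf, ?_⟩
        intro hx
        rcases List.mem_cons.mp hx with he | ht
        · subst he
          have h1 := himp rfl
          rw [hA0] at h1
          exact h1
        · exact himp2 ht
      · rintro ⟨hf, himp⟩
        refine ⟨⟨hf, ?_⟩, fun ht => himp (List.mem_cons_of_mem _ ht)⟩
        intro he
        have hxm : x ∈ p0 :: t := by rw [he]; exact List.mem_cons_self
        have h1 := himp hxm
        rw [he] at h1
        rw [hA0]
        exact h1
    · intro hf
      exact ihn (h1n hf)

-- ---- the skill partition loop of A equals B's filter/map comprehensions ----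
lemma pvPartition :
    ∀ (skill : List (List Int)) (acc1 acc2 : List (List Int)),
      List.foldl (fun (p : List (List Int) × List (List Int)) s =>
        if PySem.List.pyGetD s 0 0 = 1 then (p.1 ++ [PySem.List.slice s (some 1) none], p.2)
        else (p.1, p.2 ++ [PySem.List.slice s (some 1) none])) (acc1, acc2) skill =
      (acc1 ++ (skill.filter (fun s => PySem.List.pyGetD s 0 0 == 1)).map
          (fun s => PySem.List.slice s (some 1) none),
       acc2 ++ (skill.filter (fun s => PySem.List.pyGetD s 0 0 != 1)).map
          (fun s => PySem.List.slice s (some 1) none)) := by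
  intro skill
  induction skill with
  | nil => intro acc1 acc2; simp
  | cons s t ih =>
    intro acc1 acc2
    by_cases h : PySem.List.pyGetD s 0 0 = 1
    · simp only [List.foldl_cons, if_pos h, ih, List.filter_cons]
      simp [h, List.append_assoc]
    · simp only [List.foldl_cons, if_neg h, ih, List.filter_cons]
      simp [h, List.append_assoc]

-- ---- B's counting double loop ----
lemma pvB_count (dead : Int → Int → Bool) (M : Nat) :
    ∀ (rows : List Int) (acc : Int),
      List.foldl (fun acc r =>
        List.foldl (fun acc c => if dead r c then acc else acc + 1) acc
          (PySem.List.pyRange 0 (M : Int))) acc rows =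
      acc + (rows.length : Int) * (M : Int) -
        ((rows.flatMap (fun r => (PySem.List.pyRange 0 (M : Int)).map (fun c => (r, c)))).filter
          (fun p => dead p.1 p.2)).length := by
  intro rows
  induction rows with
  | nil => intro acc; simp
  | cons r t ih =>
    intro acc
    simp only [List.foldl_cons]
    have hinner : List.foldl (fun acc c => if dead r c then acc else acc + 1) acc
        (PySem.List.pyRange 0 (M : Int)) =
        acc + ((PySem.List.pyRange 0 (M : Int)).countP (fun c => !dead r c) : Int) := by
      rw [PySem.List.foldl_congr_mem (PySem.List.pyRange 0 (M : Int))
            (fun acc c => if dead r c then acc else acc + 1)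
            (fun acc c => if (!dead r c) = true then acc + 1 else acc) acc
            (by intro acc c _; by_cases h : dead r c <;> simp [h])]
      rw [PySem.List.foldl_if_add_one (fun c => !dead r c) (PySem.List.pyRange 0 (M : Int)) acc]
    rw [hinner, ih]
    have hlenM : (PySem.List.pyRange 0 (M : Int)).length = M := by
      rw [PySem.List.length_pyRange_one]
      omega
    have hsplit : (PySem.List.pyRange 0 (M : Int)).length =
        (PySem.List.pyRange 0 (M : Int)).countP (fun c => dead r c) +
        (PySem.List.pyRange 0 (M : Int)).countP (fun c => !dead r c) := by
      rw [List.length_eq_countP_add_countP (fun c => dead r c)]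
      congr 1
      apply List.countP_congr
      intro a _
      by_cases h : dead r a <;> simp [h]
    have hrowcnt : (((PySem.List.pyRange 0 (M : Int)).map (fun c => (r, c))).filter
        (fun p : Int × Int => dead p.1 p.2)).length =
        (PySem.List.pyRange 0 (M : Int)).countP (fun c => dead r c) := by
      rw [← List.countP_eq_length_filter, List.countP_map]
      rfl
    simp only [List.flatMap_cons, List.filter_append, List.length_append, List.length_cons]
    rw [hrowcnt]
    have h1 : (PySem.List.pyRange 0 (M : Int)).countP (fun c => dead r c) ≤
        (PySem.List.pyRange 0 (M : Int)).length := List.countP_le_length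
    push_cast
    rw [show ((t.length : Int) + 1) * (M : Int) = (t.length : Int) * (M : Int) + (M : Int) by ring]
    generalize (t.length : Int) * (M : Int) = q
    omega

-- ---- the grid list: membership and nodup ----
lemma pvGrid_mem (N M : Nat) (rows : List Int) (hrows : ∀ r : Int, r ∈ rows ↔ 0 ≤ r ∧ r < (N : Int))
    (p : Int × Int) :
    p ∈ rows.flatMap (fun r => (PySem.List.pyRange 0 (M : Int)).map (fun c => (r, c))) ↔
      pvValid N M p := by
  simp only [List.mem_flatMap, List.mem_map, pvValid]
  constructor
  · rintro ⟨r, hr, c, hc, he⟩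
    have h1 := (hrows r).mp hr
    have h2 := PySem.List.mem_pyRange_one.mp hc
    rw [← he]
    exact ⟨h1.1, h1.2, h2.1, h2.2⟩
  · rintro ⟨h1, h2, h3, h4⟩
    exact ⟨p.1, (hrows p.1).mpr ⟨h1, h2⟩, p.2, PySem.List.mem_pyRange_one.mpr ⟨h3, h4⟩, rfl⟩

lemma pvGrid_nodup (M : Nat) :
    ∀ (rows : List Int), rows.Nodup →
      (rows.flatMap (fun r => (PySem.List.pyRange 0 (M : Int)).map (fun c => (r, c)))).Nodup := by
  intro rows
  induction rows with
  | nil => intro _; simp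
  | cons r t ih =>
    intro hnd
    have hnd' := List.nodup_cons.mp hnd
    simp only [List.flatMap_cons]
    rw [List.nodup_append]
    refine ⟨?_, ih hnd'.2, ?_⟩
    · exact List.Nodup.map (fun a b h => by simpa using h)
        (PySem.List.nodup_pyRange_one 0 (M : Int))
    · intro x hx y hy hxy
      obtain ⟨c, _, he⟩ := List.mem_map.mp hx
      obtain ⟨r', hr', hyr⟩ := List.mem_flatMap.mp hy
      obtain ⟨c', _, he'⟩ := List.mem_map.mp hyr
      apply hnd'.1
      have hrc : (r, c) = (r', c') := by rw [he, hxy, ← he']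
      have hrr : r = r' := ((Prod.mk.injEq _ _ _ _).mp hrc).1
      exact hrr ▸ hr'

-- a length-6 list is a 6-tuple
lemma pvLen6 {s : List Int} (h : s.length = 6) :
    ∃ x0 x1 x2 x3 x4 x5 : Int, s = [x0, x1, x2, x3, x4, x5] := by
  rcases s with _ | ⟨x0, s⟩; · simp at h
  rcases s with _ | ⟨x1, s⟩; · simp at h
  rcases s with _ | ⟨x2, s⟩; · simp at h
  rcases s with _ | ⟨x3, s⟩; · simp at h
  rcases s with _ | ⟨x4, s⟩; · simp at h
  rcases s with _ | ⟨x5, s⟩; · simp at h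
  rcases s with _ | ⟨x6, s⟩
  · exact ⟨x0, x1, x2, x3, x4, x5, rfl⟩
  · have h7 : s.length + 7 = 6 := by simpa using h
    omega

lemma pvBDead_eq (attacks defenses : List (List Int)) (v0 r c : Int) :
    pvBDead attacks defenses v0 r c =
      (if (List.foldl (pvBAtkStep r c) (v0, false) attacks).2 = true then
        pvBDefend (List.foldl (pvBAtkStep r c) (v0, false) attacks).1 r c defenses
      else false) := rfl

-- an attack whose rectangle is empty never touches any cell
lemma pvBAtk_skip (as : List (List Int))
    (h : ∀ a ∈ as, ∃ r1 c1 r2 c2 d : Int, a = [r1, c1, r2, c2, d] ∧ ¬(r1 ≤ r2 ∧ c1 ≤ c2)) :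
    ∀ (v : Int) (dd : Bool) (r c : Int), List.foldl (pvBAtkStep r c) (v, dd) as = (v, dd) := by
  induction as with
  | nil => intro v dd r c; rfl
  | cons a t ih =>
    intro v dd r c
    obtain ⟨r1, c1, r2, c2, d, ha, hemp⟩ := h a List.mem_cons_self
    subst ha
    have hstep : pvBAtkStep r c (v, dd) [r1, c1, r2, c2, d] = (v, dd) := by
      show (if r1 ≤ r ∧ r ≤ r2 ∧ c1 ≤ c ∧ c ≤ c2 then
          (v - d, dd || decide (v - d ≤ 0)) else (v, dd)) = (v, dd)
      rw [if_neg (fun hx => hemp ⟨le_trans hx.1 hx.2.1, le_trans hx.2.2.1 hx.2.2.2⟩)]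
    rw [List.foldl_cons, hstep]
    exact ih (fun x hx => h x (List.mem_cons_of_mem _ hx)) v dd r c

-- ===== VERDICT (by name: the statement is the Claim_ definition above) =====
theorem solution_only_destroyed_buildings_spec : Claim_equal_solution_only_destroyed_buildings := by
  intro board skill hdom hpre
  unfold Spec_solution_only_destroyed_buildings
  obtain ⟨hne, hrect, hrows, hall6⟩ := hpre
  have hM0 : PySem.List.pyGetD board 0 [] = board.headD [] := by
    cases board with
    | nil => exact absurd rfl hne
    | cons h t => rw [PySem.List.pyGetD_zero_cons]; rfl
  have hpart := pvPartition skill [] []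
  have hpart1 : (List.foldl (fun (p : List (List Int) × List (List Int)) s =>
      if PySem.List.pyGetD s 0 0 = 1 then (p.1 ++ [PySem.List.slice s (some 1) none], p.2)
      else (p.1, p.2 ++ [PySem.List.slice s (some 1) none])) ([], []) skill).1 =
      (skill.filter (fun s => PySem.List.pyGetD s 0 0 == 1)).map
        (fun s => PySem.List.slice s (some 1) none) := by
    rw [hpart]
    simp
  have hpart2 : (List.foldl (fun (p : List (List Int) × List (List Int)) s =>
      if PySem.List.pyGetD s 0 0 = 1 then (p.1 ++ [PySem.List.slice s (some 1) none], p.2)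
      else (p.1, p.2 ++ [PySem.List.slice s (some 1) none])) ([], []) skill).2 =
      (skill.filter (fun s => PySem.List.pyGetD s 0 0 != 1)).map
        (fun s => PySem.List.slice s (some 1) none) := by
    rw [hpart]
    simp
  simp only [solution_only_destroyed_buildings, solution_only_destroyed_buildings_alt]
  rw [hpart1, hpart2, hM0]
  set Mn := (board.headD []).length with hMn
  set attacks := (skill.filter (fun s => PySem.List.pyGetD s 0 0 == 1)).map
      (fun s => PySem.List.slice s (some 1) none) with hatt
  set defenses := (skill.filter (fun s => PySem.List.pyGetD s 0 0 != 1)).map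
      (fun s => PySem.List.slice s (some 1) none) with hdef
  have hgetd1 : ∀ s ∈ skill, (PySem.List.pyGetD s 0 0 == 1) = true → s.getD 0 0 = 1 := by
    intro s hs hflt
    rcases s with _ | ⟨h0, t0⟩
    · exact absurd rfl (hrows [] hs).1
    · rw [PySem.List.pyGetD_zero_cons] at hflt
      simpa using hflt
  have hokA : ∀ a ∈ attacks, pvOkAtk board.length Mn a := by
    intro a ha
    rw [hatt] at ha
    obtain ⟨s, hsf, hslice⟩ := List.mem_map.mp ha
    obtain ⟨hs, hflt⟩ := List.mem_filter.mp hsf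
    have hgd := hgetd1 s hs hflt
    obtain ⟨h6, himp⟩ := (hrows s hs).2 hgd
    obtain ⟨x0, x1, x2, x3, x4, x5, rfl⟩ := pvLen6 h6
    refine ⟨x1, x2, x3, x4, x5, ?_, ?_⟩
    · rw [← hslice, PySem.List.slice_from_one]
      rfl
    · intro h12 h34
      have hb := himp (by simpa [List.getD] using h12) (by simpa [List.getD] using h34)
      simp only [List.getD] at hb
      simpa [List.getD] using hb
  have hbdims : pvDims board.length Mn board := ⟨rfl, fun row hr => hrect row hr⟩
  obtain ⟨hd1, hv1, hm1, hn1⟩ := pvA_atkList attacks hokA board PySem.Set.empty hbdims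
  set st := List.foldl pvAAttack (board, (PySem.Set.empty : PySem.Set (Int × Int))) attacks
    with hst
  have hdmem : ∀ p : Int × Int, p ∈ st.2 ↔ pvValid board.length Mn p ∧
      (List.foldl (pvBAtkStep p.1 p.2) (pvACell board p.1 p.2, false) attacks).2 = true := by
    intro p
    rw [hm1 p]
    constructor
    · rintro (habs | hgood)
      · exact absurd habs (by simp [PySem.Set.empty])
      · exact hgood
    · exact fun h => Or.inr h
  have hdnd : st.2.Nodup := hn1 List.nodup_nil
  have hvalid : ∀ p ∈ st.2, pvValid board.length Mn p := fun p hp => ((hdmem p).mp hp).1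
  have hcellv : ∀ p ∈ st.2, pvACell st.1 p.1 p.2 =
      (List.foldl (pvBAtkStep p.1 p.2) (pvACell board p.1 p.2, false) attacks).1 := by
    intro p hp
    obtain ⟨w1, w2, w3, w4⟩ := hvalid p hp
    exact hv1 p.1 p.2 w1 w2 w3 w4
  have hFmn : (∀ x : Int × Int,
      x ∈ (List.foldl (fun (q : List (List Int) × PySem.Set (Int × Int)) p =>
        pvADefend defenses q.1 q.2 p.1 p.2) (st.1, st.2) st.2).2 ↔
      pvValid board.length Mn x ∧
        pvBDead attacks defenses (pvBCell board x.1 x.2) x.1 x.2 = true) ∧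
      (List.foldl (fun (q : List (List Int) × PySem.Set (Int × Int)) p =>
        pvADefend defenses q.1 q.2 p.1 p.2) (st.1, st.2) st.2).2.Nodup := by
    by_cases hatk : ∃ s ∈ skill,
        s.getD 0 0 = 1 ∧ s.getD 1 0 ≤ s.getD 3 0 ∧ s.getD 2 0 ≤ s.getD 4 0
    · -- some attack rectangle is non-empty: every skill row has length 6
      have hokD : ∀ a ∈ defenses, pvOkArgs a := by
        intro a ha
        rw [hdef] at ha
        obtain ⟨s, hsf, hslice⟩ := List.mem_map.mp ha
        obtain ⟨hs, _⟩ := List.mem_filter.mp hsf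
        obtain ⟨x0, x1, x2, x3, x4, x5, rfl⟩ := pvLen6 (hall6 hatk s hs)
        refine ⟨x1, x2, x3, x4, x5, ?_⟩
        rw [← hslice, PySem.List.slice_from_one]
        rfl
      obtain ⟨hfm, hfn⟩ := pvA_defFold defenses hokD
        (fun p => (List.foldl (pvBAtkStep p.1 p.2) (pvACell board p.1 p.2, false) attacks).1)
        st.2 hdnd hvalid st.1 st.2 hd1 hcellv
      refine ⟨?_, hfn hdnd⟩
      intro x
      rw [hfm x]
      constructor
      · rintro ⟨hd, himp⟩
        obtain ⟨hv, hflag⟩ := (hdmem x).mp hd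
        refine ⟨hv, ?_⟩
        rw [pvBDead_eq, pvBCell_eq_pvACell, if_pos hflag]
        exact himp hd
      · rintro ⟨hv, hdead⟩
        rw [pvBDead_eq, pvBCell_eq_pvACell] at hdead
        by_cases hflag :
            (List.foldl (pvBAtkStep x.1 x.2) (pvACell board x.1 x.2, false) attacks).2 = true
        · have hd : x ∈ st.2 := (hdmem x).mpr ⟨hv, hflag⟩
          rw [if_pos hflag] at hdead
          exact ⟨hd, fun _ => hdead⟩
        · rw [if_neg hflag] at hdead
          exact absurd hdead (by simp)
    · -- every attack rectangle is empty: nothing is ever destroyed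
      have hempall : ∀ a ∈ attacks, ∃ r1 c1 r2 c2 d : Int,
          a = [r1, c1, r2, c2, d] ∧ ¬(r1 ≤ r2 ∧ c1 ≤ c2) := by
        intro a ha
        rw [hatt] at ha
        obtain ⟨s, hsf, hslice⟩ := List.mem_map.mp ha
        obtain ⟨hs, hflt⟩ := List.mem_filter.mp hsf
        have hgd := hgetd1 s hs hflt
        obtain ⟨h6, _⟩ := (hrows s hs).2 hgd
        obtain ⟨x0, x1, x2, x3, x4, x5, rfl⟩ := pvLen6 h6
        refine ⟨x1, x2, x3, x4, x5, ?_, ?_⟩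
        · rw [← hslice, PySem.List.slice_from_one]
          rfl
        · rintro ⟨h13, h24⟩
          exact hatk ⟨[x0, x1, x2, x3, x4, x5], hs, hgd,
            by simpa [List.getD] using h13, by simpa [List.getD] using h24⟩
      have hst2nil : st.2 = [] := by
        rw [List.eq_nil_iff_forall_not_mem]
        intro p hp
        obtain ⟨hv, hflag⟩ := (hdmem p).mp hp
        rw [pvBAtk_skip attacks hempall (pvACell board p.1 p.2) false p.1 p.2] at hflag
        simp at hflag
      refine ⟨?_, ?_⟩
      · intro x
        constructor
        · intro hx
          rw [hst2nil] at hx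
          simp at hx
        · rintro ⟨hv, hdead⟩
          rw [pvBDead_eq, pvBCell_eq_pvACell,
              pvBAtk_skip attacks hempall (pvACell board x.1 x.2) false x.1 x.2] at hdead
          simp at hdead
      · rw [hst2nil]
        simp
  obtain ⟨hFm, hFnd⟩ := hFmn
  have hrowsmem : ∀ r : Int, r ∈ PySem.List.pyRange 0 (board.length : Int) ↔
      0 ≤ r ∧ r < (board.length : Int) := by
    intro r
    rw [PySem.List.mem_pyRange_one]
  have hgridmem := pvGrid_mem board.length Mn (PySem.List.pyRange 0 (board.length : Int)) hrowsmem
  have hgridnd : ((PySem.List.pyRange 0 (board.length : Int)).flatMap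
      (fun r => (PySem.List.pyRange 0 (Mn : Int)).map (fun c => (r, c)))).Nodup :=
    pvGrid_nodup Mn _ (PySem.List.nodup_pyRange_one 0 _)
  have hperm : (List.foldl (fun (q : List (List Int) × PySem.Set (Int × Int)) p =>
      pvADefend defenses q.1 q.2 p.1 p.2) (st.1, st.2) st.2).2.Perm
      (((PySem.List.pyRange 0 (board.length : Int)).flatMap
        (fun r => (PySem.List.pyRange 0 (Mn : Int)).map (fun c => (r, c)))).filter
        (fun p => pvBDead attacks defenses (pvBCell board p.1 p.2) p.1 p.2)) := by
    rw [List.perm_ext_iff_of_nodup hFnd (hgridnd.filter _)]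
    intro x
    rw [List.mem_filter, hFm x, hgridmem x]
  have hlenF := hperm.length_eq
  have hBeq : List.foldl (fun acc r =>
      List.foldl (fun acc c =>
        if pvBDead attacks defenses (pvBCell board r c) r c = true then acc else acc + 1) acc
        (PySem.List.pyRange 0 (Mn : Int))) 0 (PySem.List.pyRange 0 (board.length : Int)) =
      0 + (((PySem.List.pyRange 0 (board.length : Int)).length : Int)) * (Mn : Int) -
        ((((PySem.List.pyRange 0 (board.length : Int)).flatMap
          (fun r => (PySem.List.pyRange 0 (Mn : Int)).map (fun c => (r, c)))).filter
          (fun p => pvBDead attacks defenses (pvBCell board p.1 p.2) p.1 p.2)).length : Int) :=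
    pvB_count (fun r c => pvBDead attacks defenses (pvBCell board r c) r c) Mn
      (PySem.List.pyRange 0 (board.length : Int)) 0
  rw [PySem.Set.len_eq, hlenF, hBeq]
  have hrl : (PySem.List.pyRange 0 (board.length : Int)).length = board.length := by
    rw [PySem.List.length_pyRange_one]
    omega
  rw [hrl]
  omega
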